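-- pv_equiv track=rewrite | github.com/VicenteTapi/Ejercicio-paneles | junior/python/main.py | calculate_panels
-- ===== SOURCE A (Python) =====
-- def calculate_panels(panel_width: int, panel_height: int,
--                     roof_width: int, roof_height: int) -> int:
--
--     cantidad = 0
--     if panel_height > roof_height or panel_width > roof_width:
--         return cantidad
--     cantx = roof_height // panel_height
--     canty = roof_width // panel_width
--
--     roof_base_h = cantx*panel_height
--     roof_base_w = canty*panel_width
--
--     cantidad = cantx*canty
--
--     if roof_base_h == roof_height and roof_base_w == roof_width:
--         return cantidad
--     roof_down_h = roof_height - roof_base_h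
--     roof_down_w = roof_width
--
--     roof_right_h = roof_base_h
--     roof_right_w = roof_width - roof_base_w
--
--     cantidad += calculate_panels(panel_height, panel_width, roof_right_w, roof_right_h)
--     cantidad += calculate_panels(panel_height, panel_width, roof_down_w, roof_down_h)
--
--     return cantidad
-- ===== SOURCE B (Python) =====
-- def calculate_panels(panel_width: int, panel_height: int,
--                      roof_width: int, roof_height: int) -> int:
--     # Iterative version: explicit stack of pending (panel_w, panel_h, roof_w, roof_h) subproblems.
--     total = 0
--     stack = [(panel_width, panel_height, roof_width, roof_height)]
--     while stack:
--         pw, ph, rw, rh = stack.pop()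
--         if ph > rh or pw > rw:
--             continue
--         cantx = rh // ph
--         canty = rw // pw
--         base_h = cantx * ph
--         base_w = canty * pw
--         total += cantx * canty
--         if base_h == rh and base_w == rw:
--             continue
--         # right strip and bottom strip, with the panel rotated
--         stack.append((ph, pw, rw - base_w, base_h))
--         stack.append((ph, pw, rw, rh - base_h))
--     return total
-- ===== Notes on version B (the rewrite author's own statement) =====
-- stated objective: alternative
-- what changed: Replaced the two-way recursion by an iterative worklist: an explicit stack of pending (panel_w, panel_h, roof_w, roof_h) subproblems and one accumulator, popping a task, counting the full grid and pushing the rotated right/bottom strips.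
-- outside the precondition, e.g. on calculate_panels(-1, -1, -1, -1): A returns 1, B returns 1; on calculate_panels(-2, 1, 5, 7): A returns -21, B returns -21
import Mathlib
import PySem

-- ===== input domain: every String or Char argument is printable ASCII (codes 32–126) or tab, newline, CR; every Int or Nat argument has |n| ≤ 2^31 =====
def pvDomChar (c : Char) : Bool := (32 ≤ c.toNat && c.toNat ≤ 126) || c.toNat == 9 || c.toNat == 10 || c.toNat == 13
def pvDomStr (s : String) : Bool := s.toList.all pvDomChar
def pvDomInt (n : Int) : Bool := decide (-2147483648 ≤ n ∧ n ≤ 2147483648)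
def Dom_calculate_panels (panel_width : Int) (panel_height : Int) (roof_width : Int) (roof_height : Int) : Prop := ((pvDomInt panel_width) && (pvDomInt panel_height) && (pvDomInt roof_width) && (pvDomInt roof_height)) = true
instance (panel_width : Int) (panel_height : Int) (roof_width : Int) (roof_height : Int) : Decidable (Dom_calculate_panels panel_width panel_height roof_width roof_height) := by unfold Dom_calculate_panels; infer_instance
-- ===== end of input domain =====

-- ===== PORT A =====
-- Port of A: the Python recursion, made total with a fuel guard ((rw*rh).toNat+1 bounds the
-- recursion depth on Pre_ inputs); fuel exhaustion is unreachable under Pre_.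
def calculate_panels_fuel : Nat → Int → Int → Int → Int → Int
  | 0, _, _, _, _ => 0
  | fuel+1, panel_width, panel_height, roof_width, roof_height =>
    if panel_height > roof_height ∨ panel_width > roof_width then 0
    else
      let cantx := PySem.Int.floordiv roof_height panel_height
      let canty := PySem.Int.floordiv roof_width panel_width
      let roof_base_h := cantx * panel_height
      let roof_base_w := canty * panel_width
      let cantidad := cantx * canty
      if roof_base_h = roof_height ∧ roof_base_w = roof_width then cantidad
      else
        cantidad
          + calculate_panels_fuel fuel panel_height panel_width (roof_width - roof_base_w) roof_base_h
          + calculate_panels_fuel fuel panel_height panel_width roof_width (roof_height - roof_base_h)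

def calculate_panels (panel_width : Int) (panel_height : Int) (roof_width : Int) (roof_height : Int) : Int :=
  calculate_panels_fuel ((roof_width * roof_height).toNat + 1) panel_width panel_height roof_width roof_height

-- ===== PORT B =====
-- Port of B: while-loop over an explicit stack, one fuel unit per loop iteration
-- (2*(rw*rh).toNat+1 bounds the iteration count on Pre_ inputs).
def calc_loop : Nat → List (Int × Int × Int × Int) → Int → Int
  | 0, _, total => total
  | fuel+1, stack, total =>
    match stack with
    | [] => total
    | (pw, ph, rw, rh) :: rest =>
      if ph > rh ∨ pw > rw then calc_loop fuel rest total
      else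
        let cantx := PySem.Int.floordiv rh ph
        let canty := PySem.Int.floordiv rw pw
        let base_h := cantx * ph
        let base_w := canty * pw
        if base_h = rh ∧ base_w = rw then calc_loop fuel rest (total + cantx * canty)
        else
          calc_loop fuel ((ph, pw, rw, rh - base_h) :: (ph, pw, rw - base_w, base_h) :: rest)
            (total + cantx * canty)

def calculate_panels_alt (panel_width : Int) (panel_height : Int) (roof_width : Int) (roof_height : Int) : Int :=
  calc_loop (2 * (roof_width * roof_height).toNat + 1)
    [(panel_width, panel_height, roof_width, roof_height)] 0

-- ===== PRECONDITION & SPEC =====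
-- Pre_ excludes inputs with a nonpositive panel dimension that the top-level guard does not reject:
-- there the Python A divides by zero (ZeroDivisionError) or usually recurses without bound
-- (RecursionError); on the negative corners where the recursion happens to terminate A returns
-- a (meaningless) value and B returns the same one anyway.
def Pre_calculate_panels (panel_width : Int) (panel_height : Int) (roof_width : Int) (roof_height : Int) : Prop :=
  (0 < panel_width ∧ 0 < panel_height) ∨ panel_height > roof_height ∨ panel_width > roof_width
instance (panel_width : Int) (panel_height : Int) (roof_width : Int) (roof_height : Int) : Decidable (Pre_calculate_panels panel_width panel_height roof_width roof_height) := by unfold Pre_calculate_panels; infer_instance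

def pvWitness_calculate_panels : Int × Int × Int × Int := (2, 3, 10, 7)

def Spec_calculate_panels (panel_width : Int) (panel_height : Int) (roof_width : Int) (roof_height : Int) (out : Int) : Prop := out = calculate_panels_alt panel_width panel_height roof_width roof_height
instance (panel_width : Int) (panel_height : Int) (roof_width : Int) (roof_height : Int) (out : Int) : Decidable (Spec_calculate_panels panel_width panel_height roof_width roof_height out) := by unfold Spec_calculate_panels; infer_instance

-- ===== CLAIM (what is proved, stated in full; the proofs are below) =====
def Claim_equal_calculate_panels : Prop := ∀ (panel_width : Int) (panel_height : Int) (roof_width : Int) (roof_height : Int), Dom_calculate_panels panel_width panel_height roof_width roof_height → Pre_calculate_panels panel_width panel_height roof_width roof_height → Spec_calculate_panels panel_width panel_height roof_width roof_height (calculate_panels panel_width panel_height roof_width roof_height)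

-- ===== LEMMAS AND PROOFS =====

-- facts about one fitting step (all with positive panel dimensions)
theorem pv_fit_facts (pw ph rw rh : Int) (hpw : 0 < pw) (hph : 0 < ph)
    (hh : ph ≤ rh) (hw : pw ≤ rw) :
    ph ≤ (rh / ph) * ph ∧ (rh / ph) * ph ≤ rh ∧ rh - (rh / ph) * ph < ph ∧
    pw ≤ (rw / pw) * pw ∧ (rw / pw) * pw ≤ rw ∧ rw - (rw / pw) * pw < pw := by
  have h1 := Int.ediv_add_emod rh ph
  have h2 := Int.emod_nonneg rh (by omega : ph ≠ 0)
  have h3 := Int.emod_lt_of_pos rh hph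
  have h4 := Int.ediv_add_emod rw pw
  have h5 := Int.emod_nonneg rw (by omega : pw ≠ 0)
  have h6 := Int.emod_lt_of_pos rw hpw
  have hq1 : 1 ≤ rh / ph := by
    rw [Int.le_ediv_iff_mul_le hph]; omega
  have hq2 : 1 ≤ rw / pw := by
    rw [Int.le_ediv_iff_mul_le hpw]; omega
  refine ⟨?_, by nlinarith, by nlinarith, ?_, by nlinarith, by nlinarith⟩
  · nlinarith
  · nlinarith

-- the two strip areas together are strictly below the parent roof area
theorem pv_area_decrease (pw ph rw rh : Int) (hpw : 0 < pw) (hph : 0 < ph)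
    (hh : ph ≤ rh) (hw : pw ≤ rw) :
    ((rw - (rw / pw) * pw) * ((rh / ph) * ph)).toNat
      + (rw * (rh - (rh / ph) * ph)).toNat < (rw * rh).toNat := by
  obtain ⟨f1, f2, f3, f4, f5, f6⟩ := pv_fit_facts pw ph rw rh hpw hph hh hw
  have ha1 : 0 ≤ (rw - (rw / pw) * pw) * ((rh / ph) * ph) := by nlinarith
  have ha2 : 0 ≤ rw * (rh - (rh / ph) * ph) := by nlinarith
  have hsum : (rw - (rw / pw) * pw) * ((rh / ph) * ph) + rw * (rh - (rh / ph) * ph)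
      < rw * rh := by nlinarith
  omega

-- rewriting floordiv to ediv under a positive divisor
theorem pv_fd (a b : Int) (hb : 0 < b) : PySem.Int.floordiv a b = a / b :=
  PySem.Int.floordiv_eq_ediv_of_pos hb

-- Port A computes the same value under any two sufficient fuels
theorem pv_fuelA_eq (f : Nat) : ∀ (g : Nat) (pw ph rw rh : Int), 0 < pw → 0 < ph →
    (rw * rh).toNat < f → (rw * rh).toNat < g →
    calculate_panels_fuel f pw ph rw rh = calculate_panels_fuel g pw ph rw rh := by
  induction f using Nat.strong_induction_on with
  | _ f ih =>
    intro g pw ph rw rh hpw hph hf hg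
    obtain ⟨f', rfl⟩ : ∃ f', f = f' + 1 := ⟨f - 1, by omega⟩
    obtain ⟨g', rfl⟩ : ∃ g', g = g' + 1 := ⟨g - 1, by omega⟩
    show (if ph > rh ∨ pw > rw then 0 else _) = (if ph > rh ∨ pw > rw then 0 else _)
    by_cases hguard : ph > rh ∨ pw > rw
    · simp [hguard]
    · push_neg at hguard
      obtain ⟨hh, hw⟩ := hguard
      have hdec := pv_area_decrease pw ph rw rh hpw hph hh hw
      simp only [if_neg (by omega : ¬(ph > rh ∨ pw > rw))]
      rw [pv_fd rh ph hph, pv_fd rw pw hpw]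
      by_cases hexact : (rh / ph) * ph = rh ∧ (rw / pw) * pw = rw
      · simp [hexact]
      · simp only [if_neg hexact]
        rw [ih f' (by omega) g' ph pw (rw - (rw / pw) * pw) ((rh / ph) * ph) hph hpw
              (by omega) (by omega),
            ih f' (by omega) g' ph pw rw (rh - (rh / ph) * ph) hph hpw
              (by omega) (by omega)]

-- one-step characterisation of Port A on positive panel dimensions
theorem pv_A_unfold (pw ph rw rh : Int) (hpw : 0 < pw) (hph : 0 < ph) :
    calculate_panels pw ph rw rh =
      if ph > rh ∨ pw > rw then 0
      else
        if (rh / ph) * ph = rh ∧ (rw / pw) * pw = rw then (rh / ph) * (rw / pw)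
        else
          (rh / ph) * (rw / pw)
            + calculate_panels ph pw (rw - (rw / pw) * pw) ((rh / ph) * ph)
            + calculate_panels ph pw rw (rh - (rh / ph) * ph) := by
  show calculate_panels_fuel ((rw * rh).toNat + 1) pw ph rw rh = _
  show (if ph > rh ∨ pw > rw then 0 else _) = _
  by_cases hguard : ph > rh ∨ pw > rw
  · simp [hguard]
  · push_neg at hguard
    obtain ⟨hh, hw⟩ := hguard
    have hdec := pv_area_decrease pw ph rw rh hpw hph hh hw
    simp only [if_neg (by omega : ¬(ph > rh ∨ pw > rw))]
    rw [pv_fd rh ph hph, pv_fd rw pw hpw]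
    by_cases hexact : (rh / ph) * ph = rh ∧ (rw / pw) * pw = rw
    · simp [hexact]
    · simp only [if_neg hexact]
      unfold calculate_panels
      rw [pv_fuelA_eq ((rw * rh).toNat)
            (((rw - (rw / pw) * pw) * ((rh / ph) * ph)).toNat + 1)
            ph pw (rw - (rw / pw) * pw) ((rh / ph) * ph)
            hph hpw (by omega) (by omega),
          pv_fuelA_eq ((rw * rh).toNat)
            ((rw * (rh - (rh / ph) * ph)).toNat + 1)
            ph pw rw (rh - (rh / ph) * ph)
            hph hpw (by omega) (by omega)]

-- cost of one stack entry: bounds the number of loop iterations its subtree needs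
def pv_cost (t : Int × Int × Int × Int) : Nat := 2 * (t.2.2.1 * t.2.2.2).toNat + 1

-- value Port A assigns to a stack entry
def pv_val (t : Int × Int × Int × Int) : Int := calculate_panels t.1 t.2.1 t.2.2.1 t.2.2.2

-- loop invariant: with positive panels on the stack and enough fuel, the loop adds
-- exactly Port A's value of every pending subproblem
theorem pv_loop_eq (f : Nat) : ∀ (stack : List (Int × Int × Int × Int)) (total : Int),
    (∀ t ∈ stack, 0 < t.1 ∧ 0 < t.2.1) →
    (stack.map pv_cost).sum ≤ f →
    calc_loop f stack total = total + (stack.map pv_val).sum := by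
  induction f using Nat.strong_induction_on with
  | _ f ih =>
    intro stack total hpos hfuel
    match stack with
    | [] =>
      match f with
      | 0 => simp [calc_loop]
      | f' + 1 => simp [calc_loop]
    | (pw, ph, rw, rh) :: rest =>
      have hcost : pv_cost (pw, ph, rw, rh) + (rest.map pv_cost).sum ≤ f := by
        simpa using hfuel
      obtain ⟨f', rfl⟩ : ∃ f', f = f' + 1 := ⟨f - 1, by
        have : 1 ≤ pv_cost (pw, ph, rw, rh) := by unfold pv_cost; omega
        omega⟩
      obtain ⟨hpw, hph⟩ : 0 < pw ∧ 0 < ph := hpos (pw, ph, rw, rh) (by simp)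
      have hposrest : ∀ t ∈ rest, 0 < t.1 ∧ 0 < t.2.1 := fun t ht => hpos t (by simp [ht])
      have hA := pv_A_unfold pw ph rw rh hpw hph
      show (if ph > rh ∨ pw > rw then _ else _) = _
      by_cases hguard : ph > rh ∨ pw > rw
      · rw [if_pos hguard]
        rw [ih f' (by omega) rest total hposrest (by
          have : 1 ≤ pv_cost (pw, ph, rw, rh) := by unfold pv_cost; omega
          omega)]
        rw [if_pos hguard] at hA
        simp [pv_val, hA]
      · push_neg at hguard
        obtain ⟨hh, hw⟩ := hguard
        have hdec := pv_area_decrease pw ph rw rh hpw hph hh hw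
        rw [if_neg (by omega : ¬(ph > rh ∨ pw > rw))] at hA ⊢
        rw [pv_fd rh ph hph, pv_fd rw pw hpw]
        by_cases hexact : (rh / ph) * ph = rh ∧ (rw / pw) * pw = rw
        · rw [if_pos hexact] at hA ⊢
          rw [ih f' (by omega) rest (total + (rh / ph) * (rw / pw)) hposrest (by
            have : 1 ≤ pv_cost (pw, ph, rw, rh) := by unfold pv_cost; omega
            omega)]
          simp only [List.map_cons, List.sum_cons, pv_val, hA]
          omega
        · rw [if_neg hexact] at hA ⊢
          have hcost1 : pv_cost (pw, ph, rw, rh) = 2 * (rw * rh).toNat + 1 := rfl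
          have hcost2 : pv_cost (ph, pw, rw, rh - (rh / ph) * ph)
              = 2 * (rw * (rh - (rh / ph) * ph)).toNat + 1 := rfl
          have hcost3 : pv_cost (ph, pw, rw - (rw / pw) * pw, (rh / ph) * ph)
              = 2 * ((rw - (rw / pw) * pw) * ((rh / ph) * ph)).toNat + 1 := rfl
          rw [ih f' (by omega)
              ((ph, pw, rw, rh - (rh / ph) * ph) :: (ph, pw, rw - (rw / pw) * pw, (rh / ph) * ph) :: rest)
              (total + (rh / ph) * (rw / pw))
              (by
                intro t ht
                simp only [List.mem_cons] at ht
                rcases ht with rfl | rfl | ht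
                · exact ⟨hph, hpw⟩
                · exact ⟨hph, hpw⟩
                · exact hposrest t ht)
              (by
                simp only [List.map_cons, List.sum_cons, hcost2, hcost3]
                omega)]
          simp only [List.map_cons, List.sum_cons, pv_val, hA]
          omega

-- fuel-insensitive facts about degenerate inputs (used for the guard branch of Pre_)
theorem pv_A_guard (f : Nat) (pw ph rw rh : Int) (h : ph > rh ∨ pw > rw) :
    calculate_panels_fuel f pw ph rw rh = 0 := by
  match f with
  | 0 => rfl
  | f' + 1 =>
    show (if ph > rh ∨ pw > rw then 0 else _) = 0
    rw [if_pos h]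

theorem pv_loop_nil (f : Nat) (total : Int) : calc_loop f [] total = total := by
  match f with
  | 0 => rfl
  | f' + 1 => rfl

theorem pv_B_guard (f : Nat) (pw ph rw rh : Int) (h : ph > rh ∨ pw > rw) :
    calc_loop f [(pw, ph, rw, rh)] 0 = 0 := by
  match f with
  | 0 => rfl
  | f' + 1 =>
    show (if ph > rh ∨ pw > rw then _ else _) = 0
    rw [if_pos h, pv_loop_nil]

-- ===== VERDICT (by name: the statement is the Claim_ definition above) =====
theorem calculate_panels_spec : Claim_equal_calculate_panels := by
  intro pw ph rw rh _ hpre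
  show calculate_panels pw ph rw rh = calculate_panels_alt pw ph rw rh
  by_cases hguard : ph > rh ∨ pw > rw
  · show calculate_panels_fuel _ pw ph rw rh = calc_loop _ [(pw, ph, rw, rh)] 0
    rw [pv_A_guard _ pw ph rw rh hguard, pv_B_guard _ pw ph rw rh hguard]
  · have hpos : 0 < pw ∧ 0 < ph := by
      rcases hpre with h | h | h
      · exact h
      · exact absurd (Or.inl h) hguard
      · exact absurd (Or.inr h) hguard
    show calculate_panels pw ph rw rh = calc_loop _ [(pw, ph, rw, rh)] 0
    rw [pv_loop_eq (2 * (rw * rh).toNat + 1) [(pw, ph, rw, rh)] 0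
        (by intro t ht; simp only [List.mem_cons, List.not_mem_nil, or_false] at ht
            subst ht; exact hpos)
        (by simp [pv_cost])]
    simp [pv_val]
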